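-- pv_equiv track=rewrite | github.com/palanshagarwal/Startup-job-search | search/views.py | filter_keyword
-- ===== SOURCE A (Python) =====
-- market_exclude={'developer':1,'engineer':1}
--
-- def filter_keyword(tags,key):
--     Skillflag=False
--     sflag=False
--     rflag=False
--     for i in tags:
--         if i['tag_type']=='SkillTag':
--             if key in (i['name']):
--                 Skillflag=True
--                 break
--     for i in tags:
--         if i['tag_type']=='RoleTag':
--             for j in market_exclude:
--                 if j in (i['name']):
--                     Skillflag=False
--                     rflag=True
--                     break
--
--     if Skillflag==False and rflag==False:
--         for i in tags:
--             if i['tag_type']=='RoleTag':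
--                 if key in (i['name']):
--                     Skillflag=True
--                     break
--     # print Skillflag
--     return Skillflag
-- ===== SOURCE B (Python) =====
-- market_exclude = {'developer': 1, 'engineer': 1}
--
-- def filter_keyword(tags, key):
--     has_skill = has_exclude = has_role = False
--     for i in tags:
--         t = i['tag_type']
--         if t == 'SkillTag':
--             if not has_skill and key in i['name']:
--                 has_skill = True
--         elif t == 'RoleTag':
--             name = i['name']
--             if 'developer' in name or 'engineer' in name:
--                 has_exclude = True
--             if key in name:
--                 has_role = True
--     return (not has_exclude) and (has_skill or has_role)
-- ===== Notes on version B (the rewrite author's own statement) =====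
-- stated objective: simpler
-- what changed: Replaced A's three sequential scans with mutable flag clobbering (Skillflag reset to False by the exclude scan, conditional third scan) by a single pass maintaining three booleans and the closed boolean form (not has_exclude) and (has_skill or has_role).
import Mathlib
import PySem

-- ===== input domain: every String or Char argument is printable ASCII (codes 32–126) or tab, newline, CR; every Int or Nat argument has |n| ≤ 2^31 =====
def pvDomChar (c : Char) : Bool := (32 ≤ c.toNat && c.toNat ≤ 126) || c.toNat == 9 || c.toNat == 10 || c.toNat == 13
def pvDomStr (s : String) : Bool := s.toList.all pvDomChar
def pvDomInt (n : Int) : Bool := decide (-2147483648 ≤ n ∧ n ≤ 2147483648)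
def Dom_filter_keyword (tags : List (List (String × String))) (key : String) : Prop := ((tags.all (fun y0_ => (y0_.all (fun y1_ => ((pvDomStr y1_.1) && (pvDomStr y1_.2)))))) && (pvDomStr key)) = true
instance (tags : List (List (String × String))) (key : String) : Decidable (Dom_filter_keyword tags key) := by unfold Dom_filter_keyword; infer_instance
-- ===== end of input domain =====

-- B replaces A's three sequential scans over tags by one pass keeping three booleans
-- and returns the closed boolean form (not has_exclude) && (has_skill || has_role): simpler, same cost.


-- shared dict-access helpers (i['k'] on an association list: first match; total forms used
-- by the ports, Pre_ below excludes exactly the inputs where Python's access raises KeyError)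
def pvLk (d : List (String × String)) (k : String) : Option String :=
  (d.find? (fun p => p.1 == k)).map (fun p => p.2)
def pvTagType (d : List (String × String)) : String := (pvLk d "tag_type").getD ""
def pvName (d : List (String × String)) : String := (pvLk d "name").getD ""

-- ===== PORT A =====
-- first loop: first SkillTag whose name contains key (break)
def aLoop1 (key : String) : List (List (String × String)) → Bool
  | [] => false
  | d :: r =>
    if pvTagType d = "SkillTag" then
      if PySem.Str.isIn key (pvName d) then true else aLoop1 key r
    else aLoop1 key r

-- inner loop over the keys of market_exclude (break on first hit)
def aInner (name : String) : List String → Bool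
  | [] => false
  | j :: r => if PySem.Str.isIn j name then true else aInner name r

-- second loop: every RoleTag; on an exclude hit set Skillflag=False, rflag=True
def aLoop2 : List (List (String × String)) → Bool → Bool → Bool × Bool
  | [], sf, rf => (sf, rf)
  | d :: r, sf, rf =>
    if pvTagType d = "RoleTag" then
      if aInner (pvName d) ["developer", "engineer"] then aLoop2 r false true
      else aLoop2 r sf rf
    else aLoop2 r sf rf

-- third loop: first RoleTag whose name contains key (break)
def aLoop3 (key : String) : List (List (String × String)) → Bool
  | [] => false
  | d :: r =>
    if pvTagType d = "RoleTag" then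
      if PySem.Str.isIn key (pvName d) then true else aLoop3 key r
    else aLoop3 key r

def filter_keyword (tags : List (List (String × String))) (key : String) : Bool :=
  let sf := aLoop1 key tags
  let p := aLoop2 tags sf false
  if p.1 = false ∧ p.2 = false then aLoop3 key tags else p.1

-- ===== PORT B =====
def bStep (key : String) (st : Bool × Bool × Bool) (d : List (String × String)) : Bool × Bool × Bool :=
  let t := pvTagType d
  if t = "SkillTag" then
    if !st.1 && PySem.Str.isIn key (pvName d) then (true, st.2.1, st.2.2) else st
  else if t = "RoleTag" then
    let n := pvName d
    let e := if PySem.Str.isIn "developer" n || PySem.Str.isIn "engineer" n then true else st.2.1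
    let r := if PySem.Str.isIn key n then true else st.2.2
    (st.1, e, r)
  else st

def filter_keyword_alt (tags : List (List (String × String))) (key : String) : Bool :=
  let st := tags.foldl (bStep key) (false, false, false)
  !st.2.1 && (st.1 || st.2.2)

-- ===== PRECONDITION & SPEC =====
-- true iff d is a SkillTag with a present name containing key (the reads loop 1 performs up to its break)
def pvSkillHit (key : String) (d : List (String × String)) : Bool :=
  pvTagType d = "SkillTag" &&
    (match pvLk d "name" with
     | some n => PySem.Str.isIn key n
     | none => false)

-- Pre_ excludes exactly the inputs where Python A raises KeyError: a tag without 'tag_type',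
-- a RoleTag without 'name', or a SkillTag without 'name' that is not preceded by a SkillTag
-- whose name contains key (loop 1 reads SkillTag names only up to its first match).
def Pre_filter_keyword (tags : List (List (String × String))) (key : String) : Prop :=
  (∀ d ∈ tags, (pvLk d "tag_type").isSome = true) ∧
  (∀ d ∈ tags, pvTagType d = "RoleTag" → (pvLk d "name").isSome = true) ∧
  (∀ i ∈ List.range tags.length,
     (pvTagType (tags.getD i []) = "SkillTag" ∧ pvLk (tags.getD i []) "name" = none) →
     ∃ j ∈ List.range i, pvSkillHit key (tags.getD j []) = true)
instance (tags : List (List (String × String))) (key : String) : Decidable (Pre_filter_keyword tags key) := by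
  unfold Pre_filter_keyword; infer_instance

def pvWitness_filter_keyword : (List (List (String × String))) × String :=
  ([[("tag_type", "SkillTag"), ("name", "python dev")],
    [("tag_type", "RoleTag"), ("name", "data analyst")]], "python")

def Spec_filter_keyword (tags : List (List (String × String))) (key : String) (out : Bool) : Prop := out = filter_keyword_alt tags key
instance (tags : List (List (String × String))) (key : String) (out : Bool) : Decidable (Spec_filter_keyword tags key out) := by unfold Spec_filter_keyword; infer_instance

-- ===== CLAIM (what is proved, stated in full; the proofs are below) =====
def Claim_equal_filter_keyword : Prop := ∀ (tags : List (List (String × String))) (key : String), Dom_filter_keyword tags key → Pre_filter_keyword tags key → Spec_filter_keyword tags key (filter_keyword tags key)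

-- ===== LEMMAS AND PROOFS =====
-- closed-form predicates both ports are reduced to
def pvS (key : String) (tags : List (List (String × String))) : Bool :=
  tags.any (fun d => pvTagType d = "SkillTag" && PySem.Str.isIn key (pvName d))
def pvE (tags : List (List (String × String))) : Bool :=
  tags.any (fun d => pvTagType d = "RoleTag" &&
    (PySem.Str.isIn "developer" (pvName d) || PySem.Str.isIn "engineer" (pvName d)))
def pvR (key : String) (tags : List (List (String × String))) : Bool :=
  tags.any (fun d => pvTagType d = "RoleTag" && PySem.Str.isIn key (pvName d))

theorem aLoop1_eq (key : String) (tags : List (List (String × String))) :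
    aLoop1 key tags = pvS key tags := by
  induction tags with
  | nil => rfl
  | cons d r ih =>
    simp only [aLoop1, pvS, List.any_cons]
    generalize PySem.Str.isIn key (pvName d) = k
    by_cases h : pvTagType d = "SkillTag" <;> cases k <;> simp [h, ih, pvS]

theorem aInner_eq (n : String) :
    aInner n ["developer", "engineer"] =
      (PySem.Str.isIn "developer" n || PySem.Str.isIn "engineer" n) := by
  simp only [aInner]
  generalize PySem.Str.isIn "developer" n = bd
  generalize PySem.Str.isIn "engineer" n = be
  cases bd <;> cases be <;> simp

theorem aLoop2_eq (tags : List (List (String × String))) (sf rf : Bool) :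
    aLoop2 tags sf rf = (sf && !pvE tags, rf || pvE tags) := by
  induction tags generalizing sf rf with
  | nil => simp [aLoop2, pvE]
  | cons d r ih =>
    simp only [aLoop2, pvE, List.any_cons, aInner_eq]
    generalize (PySem.Str.isIn "developer" (pvName d) || PySem.Str.isIn "engineer" (pvName d)) = c
    by_cases h : pvTagType d = "RoleTag" <;> cases c <;> simp [h, ih, pvE]

theorem aLoop3_eq (key : String) (tags : List (List (String × String))) :
    aLoop3 key tags = pvR key tags := by
  induction tags with
  | nil => rfl
  | cons d r ih =>
    simp only [aLoop3, pvR, List.any_cons]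
    generalize PySem.Str.isIn key (pvName d) = k
    by_cases h : pvTagType d = "RoleTag" <;> cases k <;> simp [h, ih, pvR]

theorem bFold_eq (key : String) (tags : List (List (String × String))) (s e r : Bool) :
    tags.foldl (bStep key) (s, e, r) = (s || pvS key tags, e || pvE tags, r || pvR key tags) := by
  induction tags generalizing s e r with
  | nil => simp [pvS, pvE, pvR]
  | cons d rest ih =>
    simp only [List.foldl_cons, bStep, pvS, pvE, pvR, List.any_cons]
    generalize PySem.Str.isIn key (pvName d) = k
    generalize PySem.Str.isIn "developer" (pvName d) = bd
    generalize PySem.Str.isIn "engineer" (pvName d) = be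
    by_cases ht : pvTagType d = "SkillTag"
    · have hr : ¬ pvTagType d = "RoleTag" := by simp [ht]
      cases s <;> cases k <;> simp [ht, ih, pvS, pvE, pvR]
    · by_cases hr : pvTagType d = "RoleTag"
      · cases bd <;> cases be <;> cases k <;>
          simp [hr, ih, pvS, pvE, pvR]
      · simp [ht, hr, ih, pvS, pvE, pvR]

theorem ports_eq (tags : List (List (String × String))) (key : String) :
    filter_keyword tags key = filter_keyword_alt tags key := by
  simp only [filter_keyword, filter_keyword_alt, aLoop1_eq, aLoop2_eq, aLoop3_eq, bFold_eq]
  cases hE : pvE tags <;> cases hS : pvS key tags <;> cases hR : pvR key tags <;> simp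

-- ===== VERDICT (by name: the statement is the Claim_ definition above) =====
theorem filter_keyword_spec : Claim_equal_filter_keyword := by
  intro tags key _ _
  unfold Spec_filter_keyword
  exact ports_eq tags key
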